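-- pv_equiv track=rewrite | github.com/jonasRower/FemTheory_generator | Python/posunTextu.py | odeberTop0Px
-- ===== SOURCE A (Python) =====
-- def odeberTop0Px(obsahHtml, seznamRadku, coOdeber):
--
--     obsahHtmlBezNul = []
--
--     for i in range(len(obsahHtml)):
--         radek = obsahHtml[i]
--
--         # zkontroluje, zda se jedna o dany radek v seznamu a opravi
--         for i1 in seznamRadku:
--             if (i1 == i):
--                 radek = radek.replace(coOdeber, '')
--
--         obsahHtmlBezNul.append(radek)
--
--     return(obsahHtmlBezNul)
-- ===== SOURCE B (Python) =====
-- def odeberTop0Px(obsahHtml, seznamRadku, coOdeber):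
--     # copy the lines, then walk the index list and edit the targeted line in place;
--     # indices not naming a line (negative / past the end) name nothing and are skipped
--     vysledek = list(obsahHtml)
--     n = len(obsahHtml)
--     for idx in seznamRadku:
--         if 0 <= idx < n:
--             vysledek[idx] = vysledek[idx].replace(coOdeber, '')
--     return vysledek
-- ===== Notes on version B (the rewrite author's own statement) =====
-- stated objective: faster
-- what changed: Instead of scanning every line and rescanning the whole index list per line, B copies the lines once and iterates over the index list, editing result[idx] in place for each in-range index.
import Mathlib
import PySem

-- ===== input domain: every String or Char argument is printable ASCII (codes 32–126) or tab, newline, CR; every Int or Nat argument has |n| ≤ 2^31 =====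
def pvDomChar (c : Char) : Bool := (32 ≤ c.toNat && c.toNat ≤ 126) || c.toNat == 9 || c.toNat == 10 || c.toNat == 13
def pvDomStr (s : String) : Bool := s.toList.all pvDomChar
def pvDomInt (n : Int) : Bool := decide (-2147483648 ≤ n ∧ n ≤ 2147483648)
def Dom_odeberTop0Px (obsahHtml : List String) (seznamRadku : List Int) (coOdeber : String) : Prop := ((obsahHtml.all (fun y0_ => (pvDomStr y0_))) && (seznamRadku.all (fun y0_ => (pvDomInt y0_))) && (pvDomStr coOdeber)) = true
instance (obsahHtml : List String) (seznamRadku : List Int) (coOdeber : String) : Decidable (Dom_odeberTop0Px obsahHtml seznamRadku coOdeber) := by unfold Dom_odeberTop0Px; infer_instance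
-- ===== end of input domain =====

-- B copies the lines once and walks the index list, editing the targeted line per in-range index, instead of A's scan of all lines with an inner rescan of the index list; equivalence proved on Dom.


-- ===== PORT A =====
-- for i in range(len(obsahHtml)): radek = obsahHtml[i];
--   for i1 in seznamRadku: if i1 == i: radek = radek.replace(coOdeber,'');  append.
def odeberTop0Px (obsahHtml : List String) (seznamRadku : List Int) (coOdeber : String) : List String :=
  (PySem.List.pyRange 0 (obsahHtml.length : Int) 1).foldl
    (fun acc i =>
      let radek := PySem.List.pyGetD obsahHtml i ""
      let radek := seznamRadku.foldl
        (fun r i1 => if i1 == i then PySem.Str.replace r coOdeber "" else r) radek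
      acc ++ [radek]) []

-- ===== PORT B =====
-- vysledek = list(obsahHtml); for idx in seznamRadku:
--   if 0 <= idx < n: vysledek[idx] = vysledek[idx].replace(coOdeber,'');  return vysledek.
def odeberTop0Px_alt (obsahHtml : List String) (seznamRadku : List Int) (coOdeber : String) : List String :=
  seznamRadku.foldl
    (fun r idx =>
      if 0 ≤ idx && idx < (obsahHtml.length : Int) then
        PySem.List.pySetD r idx (PySem.Str.replace (PySem.List.pyGetD r idx "") coOdeber "")
      else r)
    obsahHtml

-- ===== PRECONDITION & SPEC =====
def Spec_odeberTop0Px (obsahHtml : List String) (seznamRadku : List Int) (coOdeber : String) (out : List String) : Prop := out = odeberTop0Px_alt obsahHtml seznamRadku coOdeber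
instance (obsahHtml : List String) (seznamRadku : List Int) (coOdeber : String) (out : List String) : Decidable (Spec_odeberTop0Px obsahHtml seznamRadku coOdeber out) := by unfold Spec_odeberTop0Px; infer_instance

-- ===== CLAIM (what is proved, stated in full; the proofs are below) =====
def Claim_equal_odeberTop0Px : Prop := ∀ (obsahHtml : List String) (seznamRadku : List Int) (coOdeber : String), Dom_odeberTop0Px obsahHtml seznamRadku coOdeber → Spec_odeberTop0Px obsahHtml seznamRadku coOdeber (odeberTop0Px obsahHtml seznamRadku coOdeber)

-- ===== LEMMAS AND PROOFS =====

-- A's inner loop applies the replacement once per occurrence of i in the list.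
theorem foldl_if_eq_iterate_count (f : String → String) (i : Int) :
    ∀ (s : List Int) (r : String),
      s.foldl (fun r i1 => if i1 == i then f r else r) r = f^[s.count i] r := by
  intro s
  induction s with
  | nil => intro r; simp
  | cons x t ih =>
    intro r
    rw [List.foldl_cons, ih]
    by_cases h : x = i
    · simp [h, Function.iterate_succ_apply]
    · simp [h]

-- Pointwise effect of B's loop: element j gets f applied once per occurrence of j.
theorem setfold_getElem? (f : String → String) (l0 : List String) :
    ∀ (s : List Int) (l : List String), l.length = l0.length →
      ∀ (j : Nat),
      (s.foldl
        (fun r idx => if 0 ≤ idx && idx < (l0.length : Int) then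
            PySem.List.pySetD r idx (f (PySem.List.pyGetD r idx "")) else r) l)[j]?
      = (l[j]?).map (fun x => f^[s.count (j : Int)] x) := by
  intro s
  induction s with
  | nil =>
    intro l _ j
    simp
  | cons x t ih =>
    intro l hl j
    rw [List.foldl_cons, List.count_cons]
    by_cases hg : (0 ≤ x && x < (l0.length : Int)) = true
    · rw [if_pos hg]
      have hx0 : 0 ≤ x := by simpa using (Bool.and_elim_left hg)
      have hxn : x < (l0.length : Int) := by
        have := Bool.and_elim_right hg; simpa using this
      have hset : PySem.List.pySetD l x (f (PySem.List.pyGetD l x "")) =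
          l.set x.toNat (f (PySem.List.pyGetD l x "")) :=
        PySem.List.pySetD_of_nonneg _ _ hx0
      have hlen' : (l.set x.toNat (f (PySem.List.pyGetD l x ""))).length = l0.length := by
        simp [hl]
      rw [hset, ih _ hlen' j]
      by_cases hxj : x = (j : Int)
      · -- the edited index is j: one extra application of f
        have hjt : x.toNat = j := by omega
        have hjlt : j < l.length := by omega
        have hget : PySem.List.pyGetD l x "" = l[j] := by
          rw [hxj, PySem.List.pyGetD_natCast]
          exact List.getD_eq_getElem l "" hjlt
        rw [hjt, List.getElem?_set_self, hget]
        · simp [hxj, List.getElem?_eq_getElem hjlt, Function.iterate_succ_apply]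
        · exact hjlt
      · -- a different index: element j untouched
        have hjt : x.toNat ≠ j := by omega
        rw [List.getElem?_set_ne hjt]
        simp [hxj]
    · rw [if_neg hg, ih _ hl j]
      by_cases hxj : x = (j : Int)
      · -- guard false and x = j means j is out of range: both sides are none
        subst hxj
        have hge : l0.length ≤ j := by
          by_contra hlt
          apply hg
          simp only [Bool.and_eq_true, decide_eq_true_eq]
          constructor <;> omega
        have hnone : l[j]? = none := List.getElem?_eq_none_iff.mpr (by omega)
        simp [hnone]
      · simp [hxj]

-- Pointwise value of A's output.
theorem odeberTop0Px_getElem? (obsahHtml : List String) (seznamRadku : List Int)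
    (coOdeber : String) (j : Nat) :
    (odeberTop0Px obsahHtml seznamRadku coOdeber)[j]?
      = (obsahHtml[j]?).map
          (fun x => (fun r => PySem.Str.replace r coOdeber "")^[seznamRadku.count (j : Int)] x) := by
  unfold odeberTop0Px
  rw [PySem.List.foldl_append_singleton_eq_map]
  simp only [List.nil_append]
  by_cases hj : j < obsahHtml.length
  · rw [PySem.List.getElem?_map_pyRange_zero _ _ _ hj]
    rw [foldl_if_eq_iterate_count]
    have hget : PySem.List.pyGetD obsahHtml (j : Int) "" = obsahHtml[j] := by
      rw [PySem.List.pyGetD_natCast]; exact List.getD_eq_getElem obsahHtml "" hj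
    rw [hget, List.getElem?_eq_getElem hj]
    simp
  · rw [List.getElem?_eq_none_iff.mpr (show obsahHtml.length ≤ j by omega)]
    simp only [Option.map_none]
    apply List.getElem?_eq_none_iff.mpr
    simp only [List.length_map, PySem.List.length_pyRange_one]
    omega

theorem odeberTop0Px_eq (obsahHtml : List String) (seznamRadku : List Int) (coOdeber : String) :
    odeberTop0Px obsahHtml seznamRadku coOdeber = odeberTop0Px_alt obsahHtml seznamRadku coOdeber := by
  apply List.ext_getElem?
  intro j
  rw [odeberTop0Px_getElem?]
  unfold odeberTop0Px_alt
  rw [setfold_getElem? (fun r => PySem.Str.replace r coOdeber "") obsahHtml seznamRadku obsahHtml rfl j]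

-- ===== VERDICT (by name: the statement is the Claim_ definition above) =====
theorem odeberTop0Px_spec : Claim_equal_odeberTop0Px := by
  intro o s c _
  exact odeberTop0Px_eq o s c
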